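-- pv_equiv track=rewrite | github.com/lisadriani/motif-mark | motif-mark-oop.py | find_exon
-- ===== SOURCE A (Python) =====
-- def find_exon(fasta):
--     the_start = []
--     the_end = []
--     exons = dict()
--     ii = 0
--     iii = 0
--     for i in range(0,(len(fasta))):
--         if fasta[i].isupper()== True:
--             iii = 0
--             if i-ii not in the_start:
--                 the_start.append(i)
--             ii +=1
--             if i == len(fasta)-1:
--                 the_end.append(i)
--         if the_start != []:
--             if fasta[i].isupper()== False:
--                 if i - iii not in the_end:
--                     the_end.append(i)
--                     ii = 0
--                 iii +=1
--     for index, start in enumerate(the_start):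
--         exons[start] = the_end[index]
--     return exons
-- ===== SOURCE B (Python) =====
-- def find_exon(fasta):
--     exons = {}
--     start = None
--     for i, c in enumerate(fasta):
--         if c.isupper():
--             if start is None:
--                 start = i
--         elif start is not None:
--             exons[start] = i
--             start = None
--     if start is not None:
--         exons[start] = len(fasta) - 1
--     return exons
-- ===== Notes on version B (the rewrite author's own statement) =====
-- stated objective: faster
-- what changed: Replaced the index loop with membership scans over the growing start/end lists (plus ad-hoc counters ii/iii and a final dict-building pass) by a single linear pass that tracks the current run start in one Optional and emits each (start, end) pair as soon as the run closes.
import Mathlib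
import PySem

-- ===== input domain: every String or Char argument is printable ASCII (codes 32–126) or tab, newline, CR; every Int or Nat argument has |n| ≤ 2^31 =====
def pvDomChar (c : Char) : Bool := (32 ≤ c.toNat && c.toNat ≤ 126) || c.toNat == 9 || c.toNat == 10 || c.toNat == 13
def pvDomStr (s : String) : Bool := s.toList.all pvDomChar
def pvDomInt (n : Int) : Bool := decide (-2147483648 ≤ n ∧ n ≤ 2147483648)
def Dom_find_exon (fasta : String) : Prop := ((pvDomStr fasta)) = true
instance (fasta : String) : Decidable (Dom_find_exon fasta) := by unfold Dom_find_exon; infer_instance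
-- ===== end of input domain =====

-- B replaces A's membership-scan index loop by one linear pass tracking the current
-- uppercase-run start in an Option and emitting each (start, end) pair as the run closes.

-- ===== PORT A =====
def findExonStep (cs : List Char) (n : Int)
    (st : List Int × List Int × Int × Int) (i : Int) : List Int × List Int × Int × Int :=
  let S := st.1; let E := st.2.1; let ii := st.2.2.1; let iii := st.2.2.2
  let c := PySem.List.pyGetD cs i ' '
  let st1 :=
    if PySem.Chars.isupper c then
      let iii' : Int := 0
      let S' := if (i - ii) ∈ S then S else S ++ [i]
      let ii' := ii + 1
      let E' := if i = n - 1 then E ++ [i] else E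
      (S', E', ii', iii')
    else (S, E, ii, iii)
  let S1 := st1.1; let E1 := st1.2.1; let ii1 := st1.2.2.1; let iii1 := st1.2.2.2
  if S1 ≠ [] then
    if ¬ PySem.Chars.isupper c then
      if (i - iii1) ∈ E1 then (S1, E1, ii1, iii1 + 1)
      else (S1, E1 ++ [i], 0, iii1 + 1)
    else st1
  else st1

def findExonFinish (S E : List Int) : List (Int × Int) :=
  ((PySem.List.enumerate S 0).foldl
    (fun (d : PySem.Dict Int Int) p => d.insert p.2 (PySem.List.pyGetD E p.1 0))
    PySem.Dict.empty).items

def find_exon (fasta : String) : List (Int × Int) :=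
  let cs := fasta.toList
  let n : Int := (cs.length : Int)
  let st := (PySem.List.pyRange 0 n 1).foldl (findExonStep cs n) ([], [], 0, 0)
  findExonFinish st.1 st.2.1

-- ===== PORT B =====
def findRuns (n : Int) : List Char → Int → Option Int → List (Int × Int) → List (Int × Int)
  | [], _, start?, acc =>
    match start? with
    | some s => acc ++ [(s, n - 1)]
    | none => acc
  | c :: rest, i, start?, acc =>
    if PySem.Chars.isupper c then
      findRuns n rest (i + 1) (match start? with | none => some i | some s => some s) acc
    else
      match start? with
      | some s => findRuns n rest (i + 1) none (acc ++ [(s, i)])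
      | none => findRuns n rest (i + 1) none acc

def find_exon_alt (fasta : String) : List (Int × Int) :=
  let cs := fasta.toList
  findRuns (cs.length : Int) cs 0 none []

-- ===== PRECONDITION & SPEC =====
def Spec_find_exon (fasta : String) (out : List (Int × Int)) : Prop := out = find_exon_alt fasta
instance (fasta : String) (out : List (Int × Int)) : Decidable (Spec_find_exon fasta out) := by unfold Spec_find_exon; infer_instance

-- ===== CLAIM (what is proved, stated in full; the proofs are below) =====
def Claim_equal_find_exon : Prop := ∀ (fasta : String), Dom_find_exon fasta → Spec_find_exon fasta (find_exon fasta)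

-- ===== LEMMAS AND PROOFS =====

-- invariant relating A's loop state to B's (acc, start?) after processing i characters of an n-char string
def AInv (n : Int) (i : Nat) (S E : List Int) (ii iii : Int)
    (acc : List (Int × Int)) (start? : Option Int) : Prop :=
  (acc.map Prod.fst).Pairwise (· < ·) ∧
  match start? with
  | some s =>
      S = acc.map Prod.fst ++ [s] ∧ E = acc.map Prod.snd ++ (if (i : Int) = n then [n - 1] else []) ∧
      ii = (i : Int) - s ∧ iii = 0 ∧ 0 ≤ s ∧ s < (i : Int) ∧
      (∀ p ∈ acc, p.1 < s) ∧ (∀ p ∈ acc, p.2 < s)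
  | none =>
      S = acc.map Prod.fst ∧ E = acc.map Prod.snd ∧ ii = 0 ∧
      (∀ p ∈ acc, p.1 < (i : Int) ∧ p.2 < (i : Int)) ∧
      (acc ≠ [] → (acc.map Prod.snd).getLast? = some ((i : Int) - iii))

theorem findExonFinish_eq (L : List (Int × Int)) (h : (L.map Prod.fst).Nodup) :
    findExonFinish (L.map Prod.fst) (L.map Prod.snd) = L := by
  unfold findExonFinish
  rw [show (fun (d : PySem.Dict Int Int) (p : Int × Int) => d.insert p.2 (PySem.List.pyGetD (L.map Prod.snd) p.1 0))
      = (fun d p => d.insert ((fun q : Int × Int => q.2) p) ((fun q : Int × Int => PySem.List.pyGetD (L.map Prod.snd) q.1 0) p)) from rfl,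
    PySem.Dict.items_foldl_insert_fresh _ _ _ _
      (fun a _ => PySem.Dict.contains_empty _) (by rw [PySem.List.map_snd_enumerate]; exact h)]
  show (([] : List (Int × Int)) ++ _) = _; rw [List.nil_append]
  apply List.ext_getElem
  · simp [PySem.List.length_enumerate]
  · intro k h1 h2
    simp [PySem.List.getElem_enumerate, PySem.List.pyGetD_natCast, List.getElem?_eq_getElem h2]

theorem loop_eq (cs : List Char) (rest : List Char) :
    ∀ (i : Nat) (S E : List Int) (ii iii : Int) (acc : List (Int × Int)) (start? : Option Int),
    cs.drop i = rest → i + rest.length = cs.length →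
    AInv (cs.length : Int) i S E ii iii acc start? →
    (let st := (PySem.List.pyRange (i : Int) (cs.length : Int) 1).foldl
        (findExonStep cs (cs.length : Int)) (S, E, ii, iii)
     findExonFinish st.1 st.2.1) = findRuns (cs.length : Int) rest (i : Int) start? acc := by
  induction rest with
  | nil =>
    intro i S E ii iii acc start? hdrop hlen hinv
    have hi : i = cs.length := by simpa using hlen
    rw [PySem.List.pyRange_one_eq_nil (by exact_mod_cast le_of_eq hi.symm)]
    simp only [List.foldl_nil]
    obtain ⟨hpw, hrest⟩ := hinv
    cases start? with
    | none =>
      obtain ⟨hS, hE, -, -, -⟩ := hrest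
      show findExonFinish S E = acc
      rw [hS, hE]
      exact findExonFinish_eq acc (hpw.imp ne_of_lt)
    | some s =>
      obtain ⟨hS, hE, -, -, -, -, hlt, -⟩ := hrest
      rw [if_pos (by exact_mod_cast congrArg (Nat.cast : Nat → Int) hi)] at hE
      show findExonFinish S E = acc ++ [(s, (cs.length : Int) - 1)]
      have hS' : S = (acc ++ [(s, (cs.length : Int) - 1)]).map Prod.fst := by simp [hS]
      have hE' : E = (acc ++ [(s, (cs.length : Int) - 1)]).map Prod.snd := by simp [hE]
      rw [hS', hE']
      refine findExonFinish_eq _ ?_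
      rw [List.map_append]
      refine List.Nodup.append (hpw.imp ne_of_lt) (by simp) ?_
      intro a ha hb
      simp only [List.mem_map] at ha
      obtain ⟨p, hp, rfl⟩ := ha
      simp only [List.map_cons, List.map_nil, List.mem_singleton] at hb
      exact absurd hb (ne_of_lt (hlt p hp))
  | cons c rest' ih =>
    intro i S E ii iii acc start? hdrop hlen hinv
    have hilt : i < cs.length := by simp at hlen; omega
    have hcons : cs.drop i = cs[i] :: cs.drop (i + 1) := List.drop_eq_getElem_cons hilt
    rw [hdrop] at hcons
    have hci : cs[i] = c := (List.cons.injEq .. ▸ hcons).1.symm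
    have hdrop' : cs.drop (i + 1) = rest' := ((List.cons.injEq .. ▸ hcons).2).symm
    have hlen' : (i + 1) + rest'.length = cs.length := by simp at hlen ⊢; omega
    have hc : PySem.List.pyGetD cs (i : Int) ' ' = c := by
      rw [PySem.List.pyGetD_natCast]
      simp [List.getD, List.getElem?_eq_getElem hilt, hci]
    rw [PySem.List.pyRange_one_cons (by exact_mod_cast hilt)]
    simp only [List.foldl_cons]
    have hcast : ((i : Int) + 1) = ((i + 1 : Nat) : Int) := by push_cast; ring
    obtain ⟨hpw, hrest⟩ := hinv
    have hin : ((i : Int) = (cs.length : Int) - 1) ↔ (i + 1 = cs.length) := by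
      constructor <;> intro h <;> omega
    by_cases hcu : PySem.Chars.isupper c = true
    · -- uppercase character
      cases start? with
      | some s =>
        obtain ⟨hS, hE, hii, hiii, hs0, hsi, hlt1, hlt2⟩ := hrest
        have hifE : (if (i:Int) = (cs.length:Int) then [(cs.length:Int) - 1] else ([]:List Int)) = [] := by
          rw [if_neg]; intro h; exact absurd (by exact_mod_cast h) (Nat.ne_of_lt hilt)
        rw [hifE, List.append_nil] at hE
        have hmem : ((i : Int) - ii) ∈ S := by
          rw [hii, hS]; simp
        have hstep : findExonStep cs (cs.length : Int) (S, E, ii, iii) (i : Int)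
            = (S, if (i:Int) = (cs.length:Int) - 1 then E ++ [(i:Int)] else E, ii + 1, 0) := by
          simp only [findExonStep, hc, hcu, if_pos, hmem]
          have hSne : S ≠ [] := by rw [hS]; simp
          simp [hSne]
        rw [hstep]
        have hB : findRuns (cs.length : Int) (c :: rest') (i : Int) (some s) acc
            = findRuns (cs.length : Int) rest' ((i : Int) + 1) (some s) acc := by
          simp [findRuns, hcu]
        rw [hB, hcast]
        refine ih (i + 1) _ _ _ _ acc (some s) hdrop' hlen' ⟨hpw, hS, ?_, by push_cast; omega, rfl, hs0, by push_cast; omega, hlt1, hlt2⟩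
        by_cases hlast : (i : Int) = (cs.length : Int) - 1
        · rw [if_pos hlast, if_pos (by exact_mod_cast hin.mp hlast), hE, hlast]
        · rw [if_neg hlast, if_neg (by intro h; apply hlast; push_cast at h ⊢; omega), hE, List.append_nil]
      | none =>
        obtain ⟨hS, hE, hii, hbd, hlast⟩ := hrest
        have hmem : ((i : Int) - ii) ∉ S := by
          rw [hii, hS]; simp only [sub_zero, List.mem_map]
          rintro ⟨p, hp, hp1⟩
          exact absurd hp1 (ne_of_lt (hbd p hp).1)
        have hstep : findExonStep cs (cs.length : Int) (S, E, ii, iii) (i : Int)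
            = (S ++ [(i:Int)], if (i:Int) = (cs.length:Int) - 1 then E ++ [(i:Int)] else E, ii + 1, 0) := by
          simp only [findExonStep, hc, hcu, if_true, if_neg hmem]
          simp
        rw [hstep]
        have hB : findRuns (cs.length : Int) (c :: rest') (i : Int) none acc
            = findRuns (cs.length : Int) rest' ((i : Int) + 1) (some (i : Int)) acc := by
          simp [findRuns, hcu]
        rw [hB, hcast]
        refine ih (i + 1) _ _ _ _ acc (some (i : Int)) hdrop' hlen'
          ⟨hpw, by rw [hS], ?_, by rw [hii]; push_cast; ring, rfl, Int.natCast_nonneg i, by push_cast; omega,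
           fun p hp => (hbd p hp).1, fun p hp => (hbd p hp).2⟩
        by_cases hlast' : (i : Int) = (cs.length : Int) - 1
        · rw [if_pos hlast', if_pos (by exact_mod_cast hin.mp hlast'), hE, hlast']
        · rw [if_neg hlast', if_neg (by intro h; apply hlast'; push_cast at h ⊢; omega), hE, List.append_nil]
    · -- lowercase character
      have hcu' : PySem.Chars.isupper c = false := by simpa using hcu
      cases start? with
      | some s =>
        obtain ⟨hS, hE, hii, hiii, hs0, hsi, hlt1, hlt2⟩ := hrest
        have hifE : (if (i:Int) = (cs.length:Int) then [(cs.length:Int) - 1] else ([]:List Int)) = [] := by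
          rw [if_neg]; intro h; exact absurd (by exact_mod_cast h) (Nat.ne_of_lt hilt)
        rw [hifE, List.append_nil] at hE
        have hSne : S ≠ [] := by rw [hS]; simp
        have hmem : ((i : Int) - iii) ∉ E := by
          rw [hiii, hE]; simp only [sub_zero, List.mem_map]
          rintro ⟨p, hp, hp2⟩
          exact absurd hp2 (ne_of_lt (lt_trans (hlt2 p hp) hsi))
        have hstep : findExonStep cs (cs.length : Int) (S, E, ii, iii) (i : Int)
            = (S, E ++ [(i:Int)], 0, iii + 1) := by
          simp only [findExonStep, hc, hcu', Bool.false_eq_true, if_false, if_neg hmem]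
          simp [hSne]
        rw [hstep]
        have hB : findRuns (cs.length : Int) (c :: rest') (i : Int) (some s) acc
            = findRuns (cs.length : Int) rest' ((i : Int) + 1) none (acc ++ [(s, (i : Int))]) := by
          simp [findRuns, hcu']
        rw [hB, hcast]
        refine ih (i + 1) _ _ _ _ (acc ++ [(s, (i : Int))]) none hdrop' hlen'
          ⟨?_, by simp [hS], by simp [hE], rfl, ?_, ?_⟩
        · rw [List.map_append]
          refine List.pairwise_append.mpr ⟨hpw, by simp, ?_⟩
          intro a ha b hb
          simp only [List.mem_map] at ha
          obtain ⟨p, hp, rfl⟩ := ha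
          simp only [List.map_cons, List.map_nil, List.mem_singleton] at hb
          subst hb
          exact hlt1 p hp
        · intro p hp
          rcases List.mem_append.mp hp with h | h
          · exact ⟨by have := (hlt1 p h); push_cast; omega, by have := (hlt2 p h); push_cast; omega⟩
          · simp only [List.mem_singleton] at h
            subst h
            refine ⟨?_, ?_⟩
            · show s < ((i + 1 : Nat) : Int); push_cast; omega
            · show (i : Int) < ((i + 1 : Nat) : Int); push_cast; omega
        · intro _
          rw [List.map_append, List.getLast?_append]
          simp
          omega
      | none =>
        obtain ⟨hS, hE, hii, hbd, hlast⟩ := hrest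
        by_cases hacc : acc = []
        · subst hacc
          have hSnil : S = [] := by rw [hS]; simp
          have hstep : findExonStep cs (cs.length : Int) (S, E, ii, iii) (i : Int)
              = (S, E, ii, iii) := by
            simp [findExonStep, hc, hcu', hSnil]
          rw [hstep]
          have hB : findRuns (cs.length : Int) (c :: rest') (i : Int) none []
              = findRuns (cs.length : Int) rest' ((i : Int) + 1) none [] := by
            simp [findRuns, hcu']
          rw [hB, hcast]
          exact ih (i + 1) _ _ _ _ [] none hdrop' hlen' ⟨by simp, hS, hE, hii, by simp, by simp⟩
        · have hSne : S ≠ [] := by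
            rw [hS]; intro h; exact hacc (List.map_eq_nil_iff.mp h)
          have hmem : ((i : Int) - iii) ∈ E := by
            rw [hE]
            have := hlast hacc
            exact List.mem_of_getLast? (by rw [this])
          have hstep : findExonStep cs (cs.length : Int) (S, E, ii, iii) (i : Int)
              = (S, E, ii, iii + 1) := by
            simp only [findExonStep, hc, hcu', Bool.false_eq_true, if_false, if_pos hmem]
            simp [hSne]
          rw [hstep]
          have hB : findRuns (cs.length : Int) (c :: rest') (i : Int) none acc
              = findRuns (cs.length : Int) rest' ((i : Int) + 1) none acc := by
            simp [findRuns, hcu']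
          rw [hB, hcast]
          refine ih (i + 1) _ _ _ _ acc none hdrop' hlen'
            ⟨hpw, hS, hE, hii, fun p hp => ⟨by have := (hbd p hp).1; push_cast; omega, by have := (hbd p hp).2; push_cast; omega⟩, ?_⟩
          intro h
          rw [hlast h]
          congr 1; push_cast; ring

-- ===== VERDICT (by name: the statement is the Claim_ definition above) =====
theorem find_exon_spec : Claim_equal_find_exon := by
  intro fasta _
  unfold Spec_find_exon find_exon find_exon_alt
  exact loop_eq fasta.toList fasta.toList 0 [] [] 0 0 [] none rfl (by simp)
    (by simp [AInv])
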